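-- pv_equiv track=rewrite | github.com/karockai/Yongorithm | DP/등굣길.py | row1
-- ===== SOURCE A (Python) =====
-- def row1(aMap):
--     row = aMap[0]
--     puddle = False
--     for r in range(1,len(row)):
--         if (puddle):
--             row[r] = 0
--             continue
--         if (row[r] == -1):
--             row[r] = 0
--             puddle = True
--         else:
--             row[r] = 1
--     return aMap
-- ===== SOURCE B (Python) =====
-- def row1(aMap):
--     row = aMap[0]
--     try:
--         idx = row.index(-1, 1)
--     except ValueError:
--         idx = len(row)
--     row[1:idx] = [1] * (idx - 1)
--     row[idx:] = [0] * (len(row) - idx)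
--     return aMap
-- ===== Notes on version B (the rewrite author's own statement) =====
-- stated objective: simpler
-- what changed: Replaces the stateful per-index loop with a puddle flag by a find-then-fill decomposition: locate the first -1 from index 1 via list.index, then bulk-assign ones before it and zeros from it on via slice assignment.
import Mathlib
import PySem

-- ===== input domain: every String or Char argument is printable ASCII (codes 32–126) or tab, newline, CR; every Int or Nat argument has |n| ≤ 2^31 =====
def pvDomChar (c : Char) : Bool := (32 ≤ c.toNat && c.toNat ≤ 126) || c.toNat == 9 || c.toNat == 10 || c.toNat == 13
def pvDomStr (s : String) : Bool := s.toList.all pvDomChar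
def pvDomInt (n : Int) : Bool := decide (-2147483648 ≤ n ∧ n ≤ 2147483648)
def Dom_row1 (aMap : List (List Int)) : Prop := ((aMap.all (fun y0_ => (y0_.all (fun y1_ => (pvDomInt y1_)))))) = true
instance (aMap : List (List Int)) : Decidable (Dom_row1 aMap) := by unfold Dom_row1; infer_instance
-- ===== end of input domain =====

-- B replaces A's stateful index loop by find-the-first-puddle-then-bulk-fill (simpler decomposition).
-- Both Pythons mutate aMap[0] in place identically; the proof is about the return value.

-- ===== PORT A =====
-- loop body of A: state is (row, puddle), r the current index (r ≥ 1 here, so pySetD/pyGetD index is in the loop's range)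
def row1Step (st : List Int × Bool) (r : Int) : List Int × Bool :=
  if st.2 then (PySem.List.pySetD st.1 r 0, st.2)
  else if PySem.List.pyGetD st.1 r 0 = -1 then (PySem.List.pySetD st.1 r 0, true)
  else (PySem.List.pySetD st.1 r 1, false)

def row1 (aMap : List (List Int)) : List (List Int) :=
  match aMap with
  | [] => []   -- Python raises IndexError on aMap[0]; excluded by Pre_row1
  | row :: rest =>
    let res := (PySem.List.pyRange 1 (row.length : Int) 1).foldl row1Step (row, false)
    res.1 :: rest

-- ===== PORT B =====
def row1_alt (aMap : List (List Int)) : List (List Int) :=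
  match aMap with
  | [] => []   -- Python raises IndexError on aMap[0]; excluded by Pre_row1
  | row :: rest =>
    -- idx = row.index(-1, 1), falling back to len(row): search the tail, offset by 1
    let idx : Int :=
      match PySem.List.index? (row.drop 1) (-1) with
      | some j => (j : Int) + 1
      | none => (row.length : Int)
    -- row[1:idx] = [1]*(idx-1); row[idx:] = [0]*(len(row)-idx)  — composite effect on the list
    (row.take 1 ++ List.replicate (idx - 1).toNat 1
                ++ List.replicate ((row.length : Int) - idx).toNat 0) :: rest

-- ===== PRECONDITION & SPEC =====
-- A raises IndexError on aMap == [] (aMap[0]); that is all Pre_ excludes.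
def Pre_row1 (aMap : List (List Int)) : Prop := aMap ≠ []
instance (aMap : List (List Int)) : Decidable (Pre_row1 aMap) := by unfold Pre_row1; infer_instance
def pvWitness_row1 : List (List Int) := [[0, 1, -1, 3]]

def Spec_row1 (aMap : List (List Int)) (out : List (List Int)) : Prop := out = row1_alt aMap
instance (aMap : List (List Int)) (out : List (List Int)) : Decidable (Spec_row1 aMap out) := by unfold Spec_row1; infer_instance

-- ===== CLAIM (what is proved, stated in full; the proofs are below) =====
def Claim_equal_row1 : Prop := ∀ (aMap : List (List Int)), Dom_row1 aMap → Pre_row1 aMap → Spec_row1 aMap (row1 aMap)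

-- ===== LEMMAS AND PROOFS =====

-- elementwise characterisation of A's pass over the tail of the row
def goPass : List Int → Bool → List Int
  | [], _ => []
  | _ :: xs, true => 0 :: goPass xs true
  | x :: xs, false => if x = -1 then 0 :: goPass xs true else 1 :: goPass xs false

theorem goPass_true (xs : List Int) : goPass xs true = List.replicate xs.length 0 := by
  induction xs with
  | nil => rfl
  | cons x xs ih => simp [goPass, ih, List.replicate_succ]

theorem goPass_false (xs : List Int) :
    goPass xs false =
      match PySem.List.index? xs (-1) with
      | some j => List.replicate j 1 ++ List.replicate (xs.length - j) 0
      | none => List.replicate xs.length 1 := by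
  induction xs with
  | nil => rfl
  | cons x xs ih =>
    by_cases hx : x = -1
    · subst hx
      rw [PySem.List.index?_cons_self]
      simp [goPass, goPass_true, List.replicate_succ]
    · rw [PySem.List.index?_cons_of_ne xs hx]
      simp only [goPass, if_neg hx, ih]
      cases h : PySem.List.index? xs (-1) with
      | none => simp [List.replicate_succ]
      | some j =>
        have hj : j < xs.length := by
          obtain ⟨hk, -⟩ := PySem.List.getElem_of_index?_eq_some h
          exact hk
        simp [List.replicate_succ]

theorem loop_eq (d : Nat) (row : List Int) (k : Nat) (p : Bool)
    (hd : row.length - k = d) :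
    ((PySem.List.pyRange (k : Int) (row.length : Int) 1).foldl row1Step (row, p)).1
      = row.take k ++ goPass (row.drop k) p := by
  induction d generalizing row k p with
  | zero =>
    have hk : row.length ≤ k := by omega
    rw [PySem.List.pyRange_one_eq_nil (by exact_mod_cast hk)]
    simp [List.drop_eq_nil_of_le hk, List.take_of_length_le hk, goPass]
  | succ d ih =>
    have hk : k < row.length := by omega
    rw [PySem.List.pyRange_one_cons (by exact_mod_cast hk)]
    have hget : PySem.List.pyGetD row (k : Int) 0 = row[k] := by
      rw [PySem.List.pyGetD_eq_getElem row 0 (by positivity) (by exact_mod_cast hk)]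
      simp
    have hdrop : row.drop k = row[k] :: row.drop (k + 1) := List.drop_eq_getElem_cons hk
    have hset : ∀ v : Int, ((k : Int) + 1) = ((k + 1 : Nat) : Int) := by intro v; push_cast; ring
    have key : ∀ (v : Int) (p' : Bool),
        ((PySem.List.pyRange ((k : Int) + 1) (row.length : Int) 1).foldl row1Step
          (row.set k v, p')).1 = row.take k ++ v :: goPass (row.drop (k + 1)) p' := by
      intro v p'
      have hlen : (row.set k v).length = row.length := by simp
      have := ih (row.set k v) (k + 1) p' (by omega)
      rw [hset v, ← hlen, this]
      rw [List.set_eq_take_append_cons_drop, if_pos hk]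
      have htk : (row.take k).length = k := by simp [List.length_take]; omega
      have e1 : List.take (k + 1) (List.take k row) = List.take k row :=
        List.take_of_length_le (by omega)
      have e2 : List.drop (k + 1) (List.take k row) = ([] : List Int) :=
        List.drop_eq_nil_of_le (by omega)
      simp [List.take_append, List.drop_append, htk, e1, e2]
    rw [List.foldl_cons]
    cases p with
    | true =>
      have hs : row1Step (row, true) (k : Int) = (row.set k 0, true) := by
        simp [row1Step]
      rw [hs, key 0 true, hdrop]
      simp [goPass]
    | false =>
      by_cases hv : row[k] = -1
      · have hs : row1Step (row, false) (k : Int) = (row.set k 0, true) := by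
          simp [row1Step, hget, hv]
        rw [hs, key 0 true, hdrop]
        simp [goPass, hv]
      · have hs : row1Step (row, false) (k : Int) = (row.set k 1, false) := by
          simp [row1Step, hget, hv]
        rw [hs, key 1 false, hdrop]
        simp [goPass, hv]

-- ===== VERDICT (by name: the statement is the Claim_ definition above) =====
theorem row1_spec : Claim_equal_row1 := by
  intro aMap _ hpre
  unfold Spec_row1
  match aMap with
  | [] => exact absurd rfl hpre
  | row :: rest =>
    simp only [row1, row1_alt]
    congr 1
    have hl := loop_eq (row.length - 1) row 1 false rfl
    rw [Nat.cast_one] at hl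
    rw [hl, goPass_false]
    cases h : PySem.List.index? (row.drop 1) (-1) with
    | some j =>
      have hj : j < (row.drop 1).length := by
        obtain ⟨hk, -⟩ := PySem.List.getElem_of_index?_eq_some h
        exact hk
      have hlen : (row.drop 1).length = row.length - 1 := by simp
      have h1 : ((j : Int) + 1 - 1).toNat = j := by omega
      have h2 : ((row.length : Int) - ((j : Int) + 1)).toNat = (row.drop 1).length - j := by omega
      simp [h2]
    | none =>
      have hlen : (row.drop 1).length = row.length - 1 := by simp
      have h1 : ((row.length : Int) - 1).toNat = (row.drop 1).length := by omega
      have h2 : ((row.length : Int) - (row.length : Int)).toNat = 0 := by omega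
      simp [h1]
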